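-- pv_equiv track=rewrite | github.com/Attachment-Studios/PackedBerry | translator.py | backup_translate
-- ===== SOURCE A (Python) =====
-- def backup_translate(text: str, dest: str):
-- 	gt_ch_format = {
-- 		"%": "%25",
-- 		"\n": "%0A",
-- 		" ": "%20",
-- 		"`": "%60",
-- 		"@": "%40",
-- 		"#": "%23",
-- 		"$": "%24",
-- 		"^": "%5E",
-- 		"&": "%26",
-- 		"+": "%2B",
-- 		"=": "%3D"
-- 	}
--
-- 	text_gt_format = text.replace('', '')
--
-- 	for key in gt_ch_format:
-- 		text_gt_format = text_gt_format.replace(key, gt_ch_format[key])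
--
-- 	url = f'https://translate.google.com/?sl=auto&tl={dest}&text={text_gt_format}&op=translate'
--
-- 	translation = str(url)
-- 	return translation
-- ===== SOURCE B (Python) =====
-- def backup_translate(text: str, dest: str):
--     gt_ch_format = {
--         "%": "%25",
--         "\n": "%0A",
--         " ": "%20",
--         "`": "%60",
--         "@": "%40",
--         "#": "%23",
--         "$": "%24",
--         "^": "%5E",
--         "&": "%26",
--         "+": "%2B",
--         "=": "%3D"
--     }
--     encoded = ''.join(gt_ch_format.get(ch, ch) for ch in text)
--     return f'https://translate.google.com/?sl=auto&tl={dest}&text={encoded}&op=translate'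
-- ===== Notes on version B (the rewrite author's own statement) =====
-- stated objective: simpler
-- what changed: Replaces A's 11 sequential whole-string str.replace passes (plus a no-op replace('','')) by one per-character pass that joins each character's dict lookup; correct because every replacement code starts with '%', which A encodes first.
import Mathlib
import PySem

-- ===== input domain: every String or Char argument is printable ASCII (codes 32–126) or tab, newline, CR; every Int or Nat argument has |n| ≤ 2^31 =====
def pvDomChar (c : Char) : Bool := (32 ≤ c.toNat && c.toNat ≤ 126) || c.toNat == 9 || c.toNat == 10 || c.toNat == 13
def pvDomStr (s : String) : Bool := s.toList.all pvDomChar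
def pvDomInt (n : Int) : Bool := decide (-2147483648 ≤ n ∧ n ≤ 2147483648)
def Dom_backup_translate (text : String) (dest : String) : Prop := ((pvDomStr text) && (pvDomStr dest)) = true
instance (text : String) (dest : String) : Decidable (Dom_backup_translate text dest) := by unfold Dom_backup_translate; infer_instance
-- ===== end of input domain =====

-- B replaces A's 11 sequential whole-string .replace passes by a single per-character
-- map-and-join pass over text (objective: simpler; same result, proved below).

-- ===== PORT A =====
-- the dict, in insertion order (A iterates its keys and looks each up)
def pvGtDict : PySem.Dict String String := PySem.Dict.mk
  [("%", "%25"), ("\n", "%0A"), (" ", "%20"), ("`", "%60"), ("@", "%40"),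
   ("#", "%23"), ("$", "%24"), ("^", "%5E"), ("&", "%26"), ("+", "%2B"), ("=", "%3D")]

def backup_translate (text : String) (dest : String) : String :=
  let text_gt_format := PySem.Str.replace text "" ""
  -- for key in gt_ch_format: text_gt_format = text_gt_format.replace(key, gt_ch_format[key])
  let text_gt_format := (PySem.Dict.keys pvGtDict).foldl
    (fun acc key => PySem.Str.replace acc key (PySem.Dict.getD pvGtDict key "")) text_gt_format
  let url := "https://translate.google.com/?sl=auto&tl=" ++ dest ++ "&text=" ++ text_gt_format ++ "&op=translate"
  url

-- ===== PORT B =====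
-- same dict, keyed for per-character lookup (iterating a Python str yields its characters)
def pvGtDictAlt : PySem.Dict Char String := PySem.Dict.mk
  [('%', "%25"), ('\n', "%0A"), (' ', "%20"), ('`', "%60"), ('@', "%40"),
   ('#', "%23"), ('$', "%24"), ('^', "%5E"), ('&', "%26"), ('+', "%2B"), ('=', "%3D")]

-- gt_ch_format.get(ch, ch)
def pvEncChar (c : Char) : List Char := (PySem.Dict.getD pvGtDictAlt c (String.ofList [c])).toList

def backup_translate_alt (text : String) (dest : String) : String :=
  let encoded := String.ofList (text.toList.flatMap pvEncChar)   -- ''.join(... for ch in text)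
  "https://translate.google.com/?sl=auto&tl=" ++ dest ++ "&text=" ++ encoded ++ "&op=translate"

-- ===== PRECONDITION & SPEC =====
def Spec_backup_translate (text : String) (dest : String) (out : String) : Prop := out = backup_translate_alt text dest
instance (text : String) (dest : String) (out : String) : Decidable (Spec_backup_translate text dest out) := by unfold Spec_backup_translate; infer_instance

-- ===== CLAIM (what is proved, stated in full; the proofs are below) =====
def Claim_equal_backup_translate : Prop := ∀ (text : String) (dest : String), Dom_backup_translate text dest → Spec_backup_translate text dest (backup_translate text dest)

-- ===== LEMMAS AND PROOFS =====

/-- one-character substitution, the per-character effect of `.replace([k], r)` -/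
def pvSubst (k : Char) (r : List Char) (c : Char) : List Char := if c = k then r else [c]

/-- `replace.go` with a single-character pattern is a flatMap of `pvSubst`. -/
theorem pvGo_single (k : Char) (r : List Char) :
    ∀ (fuel : Nat) (l acc : List Char), l.length ≤ fuel →
      PySem.Chars.replace.go [k] r fuel l acc = acc.reverse ++ l.flatMap (pvSubst k r) := by
  intro fuel
  induction fuel with
  | zero =>
    intro l acc h
    have : l = [] := List.eq_nil_of_length_eq_zero (Nat.le_zero.mp h)
    subst this
    simp [PySem.Chars.replace.go]
  | succ n ih =>
    intro l acc h
    cases l with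
    | nil => simp [PySem.Chars.replace.go]
    | cons c t =>
      simp only [PySem.Chars.replace.go]
      by_cases hc : c = k
      · subst hc
        have hp : List.isPrefixOf [c] (c :: t) = true := by simp [List.isPrefixOf]
        simp only [hp, if_true]
        have h' : t.length ≤ n := by simpa using Nat.succ_le_succ_iff.mp h
        have hd : List.drop (List.length [c]) (c :: t) = t := by simp
        rw [hd, ih t (r.reverse ++ acc) h']
        simp [pvSubst]
      · have hp : List.isPrefixOf [k] (c :: t) = false := by
          simp [List.isPrefixOf]; exact fun hk => (hc hk.symm).elim
        simp only [hp]
        have h' : t.length ≤ n := by simpa using Nat.succ_le_succ_iff.mp h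
        rw [ih t (c :: acc) h']
        simp [pvSubst, hc]

theorem pvReplace_single (s : List Char) (k : Char) (r : List Char) :
    PySem.Chars.replace s [k] r = s.flatMap (pvSubst k r) := by
  simp only [PySem.Chars.replace, List.isEmpty]
  exact (pvGo_single k r s.length s [] le_rfl).trans (by simp)

/-- what the 11 successive per-character substitutions do to one character -/
theorem pvChain_char (c : Char) :
    (pvSubst '%' "%25".toList c).flatMap (fun x =>
      (pvSubst '\n' "%0A".toList x).flatMap (fun x =>
        (pvSubst ' ' "%20".toList x).flatMap (fun x =>
          (pvSubst '`' "%60".toList x).flatMap (fun x =>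
            (pvSubst '@' "%40".toList x).flatMap (fun x =>
              (pvSubst '#' "%23".toList x).flatMap (fun x =>
                (pvSubst '$' "%24".toList x).flatMap (fun x =>
                  (pvSubst '^' "%5E".toList x).flatMap (fun x =>
                    (pvSubst '&' "%26".toList x).flatMap (fun x =>
                      (pvSubst '+' "%2B".toList x).flatMap
                        (pvSubst '=' "%3D".toList)))))))))) = pvEncChar c := by
  by_cases h1 : c = '%';  · subst h1; decide
  by_cases h2 : c = '\n'; · subst h2; decide
  by_cases h3 : c = ' ';  · subst h3; decide
  by_cases h4 : c = '`';  · subst h4; decide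
  by_cases h5 : c = '@';  · subst h5; decide
  by_cases h6 : c = '#';  · subst h6; decide
  by_cases h7 : c = '$';  · subst h7; decide
  by_cases h8 : c = '^';  · subst h8; decide
  by_cases h9 : c = '&';  · subst h9; decide
  by_cases h10 : c = '+'; · subst h10; decide
  by_cases h11 : c = '='; · subst h11; decide
  have n1 : ('%' == c) = false := beq_eq_false_iff_ne.mpr (fun hk => h1 hk.symm)
  have n2 : ('\n' == c) = false := beq_eq_false_iff_ne.mpr (fun hk => h2 hk.symm)
  have n3 : (' ' == c) = false := beq_eq_false_iff_ne.mpr (fun hk => h3 hk.symm)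
  have n4 : ('`' == c) = false := beq_eq_false_iff_ne.mpr (fun hk => h4 hk.symm)
  have n5 : ('@' == c) = false := beq_eq_false_iff_ne.mpr (fun hk => h5 hk.symm)
  have n6 : ('#' == c) = false := beq_eq_false_iff_ne.mpr (fun hk => h6 hk.symm)
  have n7 : ('$' == c) = false := beq_eq_false_iff_ne.mpr (fun hk => h7 hk.symm)
  have n8 : ('^' == c) = false := beq_eq_false_iff_ne.mpr (fun hk => h8 hk.symm)
  have n9 : ('&' == c) = false := beq_eq_false_iff_ne.mpr (fun hk => h9 hk.symm)
  have n10 : ('+' == c) = false := beq_eq_false_iff_ne.mpr (fun hk => h10 hk.symm)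
  have n11 : ('=' == c) = false := beq_eq_false_iff_ne.mpr (fun hk => h11 hk.symm)
  simp [pvSubst, pvEncChar, PySem.Dict.getD, PySem.Dict.get?, pvGtDictAlt, List.find?,
        h1, h2, h3, h4, h5, h6, h7, h8, h9, h10, h11,
        n1, n2, n3, n4, n5, n6, n7, n8, n9, n10, n11]

theorem pvToList_replace_single (s k r : String) (kc : Char) (h : k.toList = [kc]) :
    (PySem.Str.replace s k r).toList = s.toList.flatMap (pvSubst kc r.toList) := by
  rw [PySem.Str.toList_replace, h, pvReplace_single]

theorem pvToList_replace_empty (s : String) :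
    (PySem.Str.replace s "" "").toList = s.toList := by
  rw [PySem.Str.toList_replace]
  simp [PySem.Chars.replace]

theorem pvEncoded_eq (text : String) :
    ((PySem.Dict.keys pvGtDict).foldl
      (fun acc key => PySem.Str.replace acc key (PySem.Dict.getD pvGtDict key ""))
      (PySem.Str.replace text "" "")).toList = text.toList.flatMap pvEncChar := by
  show (PySem.Str.replace (PySem.Str.replace (PySem.Str.replace (PySem.Str.replace
        (PySem.Str.replace (PySem.Str.replace (PySem.Str.replace (PySem.Str.replace
        (PySem.Str.replace (PySem.Str.replace (PySem.Str.replace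
        (PySem.Str.replace text "" "")
        "%" "%25") "\n" "%0A") " " "%20") "`" "%60") "@" "%40") "#" "%23")
        "$" "%24") "^" "%5E") "&" "%26") "+" "%2B") "=" "%3D").toList
      = text.toList.flatMap pvEncChar
  rw [pvToList_replace_single _ "=" "%3D" '=' rfl,
      pvToList_replace_single _ "+" "%2B" '+' rfl,
      pvToList_replace_single _ "&" "%26" '&' rfl,
      pvToList_replace_single _ "^" "%5E" '^' rfl,
      pvToList_replace_single _ "$" "%24" '$' rfl,
      pvToList_replace_single _ "#" "%23" '#' rfl,
      pvToList_replace_single _ "@" "%40" '@' rfl,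
      pvToList_replace_single _ "`" "%60" '`' rfl,
      pvToList_replace_single _ " " "%20" ' ' rfl,
      pvToList_replace_single _ "\n" "%0A" '\n' rfl,
      pvToList_replace_single _ "%" "%25" '%' rfl,
      pvToList_replace_empty]
  simp only [List.flatMap_assoc]
  exact List.flatMap_congr (fun c _ => pvChain_char c)

theorem backup_translate_spec' (text dest : String) :
    backup_translate text dest = backup_translate_alt text dest := by
  unfold backup_translate backup_translate_alt
  have h : ((PySem.Dict.keys pvGtDict).foldl
      (fun acc key => PySem.Str.replace acc key (PySem.Dict.getD pvGtDict key ""))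
      (PySem.Str.replace text "" ""))
      = String.ofList (text.toList.flatMap pvEncChar) := by
    rw [← pvEncoded_eq text, String.ofList_toList]
  simp only []   -- zeta-reduce the lets
  rw [h]

-- ===== VERDICT (by name: the statement is the Claim_ definition above) =====
theorem backup_translate_spec : Claim_equal_backup_translate := by
  intro text dest _
  exact backup_translate_spec' text dest
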